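-- pv_equiv track=rewrite | github.com/rishi1001/ML-Assignments | A2/a1.py | feature_words
-- ===== SOURCE A (Python) =====
-- def feature_words(review_text):
--     words = []
--     j=1
--     for review in review_text:
--         words_review = review.split()
--         a = []
--         if len(words_review)==0:
--             words.append(a)
--             continue
--         start_word = words_review[0]
--         for i in range(1,len(words_review)):
--             new_word = start_word+" "+words_review[i]
--             start_word = words_review[i]
--             a.append(new_word)
--         words.append(a)
--     return words
-- ===== SOURCE B (Python) =====
-- def feature_words(review_text):
--     def bigrams(ws):
--         n = len(ws)
--         if n < 2:
--             return []
--         if n == 2: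
--             return [ws[0] + " " + ws[1]]
--         m = n // 2
--         return bigrams(ws[:m+1]) + bigrams(ws[m:])
--     return [bigrams(review.split()) for review in review_text]
-- ===== Notes on version B (the rewrite author's own statement) =====
-- stated objective: alternative
-- what changed: Replaces A's single linear index pass with start_word accumulator by a divide-and-conquer recursion: the word list is split at the midpoint into two overlapping halves (sharing the middle word) whose bigram lists are computed recursively and concatenated, with a two-word base case.
import Mathlib
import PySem

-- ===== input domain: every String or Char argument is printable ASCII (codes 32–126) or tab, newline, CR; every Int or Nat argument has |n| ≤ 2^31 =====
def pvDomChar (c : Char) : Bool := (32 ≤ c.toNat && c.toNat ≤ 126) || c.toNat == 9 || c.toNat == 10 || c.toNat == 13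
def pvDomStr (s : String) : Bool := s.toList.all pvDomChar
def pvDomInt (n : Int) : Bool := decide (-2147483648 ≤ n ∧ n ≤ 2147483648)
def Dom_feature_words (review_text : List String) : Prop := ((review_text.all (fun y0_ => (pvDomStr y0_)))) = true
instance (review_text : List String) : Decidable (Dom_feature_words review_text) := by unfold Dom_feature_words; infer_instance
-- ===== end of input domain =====

-- B replaces A's single linear index pass (start_word accumulator) by a divide-and-conquer
-- recursion on the word list, splitting at the midpoint into overlapping halves (objective: alternative).


-- ===== PORT A =====
def feature_words (review_text : List String) : List (List String) :=
  review_text.foldl (fun words review =>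
    let words_review := PySem.Str.split₀ review
    let a : List String := []
    if words_review.length = 0 then
      words ++ [a]
    else
      let start_word := PySem.List.pyGetD words_review 0 ""
      let st := (PySem.List.pyRange 1 words_review.length 1).foldl
        (fun (st : String × List String) i =>
          let new_word := st.1 ++ " " ++ PySem.List.pyGetD words_review i ""
          (PySem.List.pyGetD words_review i "", st.2 ++ [new_word]))
        (start_word, a)
      words ++ [st.2]) []

-- ===== PORT B =====
-- Source B's inner helper 'bigrams': divide and conquer on the word list.
def pvBigrams (ws : List String) : List String :=
  if ws.length < 2 then []
  else if ws.length = 2 then [PySem.List.pyGetD ws 0 "" ++ " " ++ PySem.List.pyGetD ws 1 ""]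
  else
    pvBigrams (PySem.List.slice ws none (some ((ws.length / 2 + 1 : Nat) : Int))) ++
    pvBigrams (PySem.List.slice ws (some ((ws.length / 2 : Nat) : Int)) none)
termination_by ws.length
decreasing_by
  · rw [PySem.List.slice_to_natCast]; simp only [List.length_take]; omega
  · rw [PySem.List.slice_from_natCast]; simp only [List.length_drop]; omega

def feature_words_alt (review_text : List String) : List (List String) :=
  review_text.map (fun review => pvBigrams (PySem.Str.split₀ review))

-- ===== PRECONDITION & SPEC =====
def Spec_feature_words (review_text : List String) (out : List (List String)) : Prop := out = feature_words_alt review_text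
instance (review_text : List String) (out : List (List String)) : Decidable (Spec_feature_words review_text out) := by unfold Spec_feature_words; infer_instance

-- ===== CLAIM =====
def Claim_equal_feature_words : Prop := ∀ (review_text : List String), Dom_feature_words review_text → Spec_feature_words review_text (feature_words review_text)

-- ===== LEMMAS AND PROOFS =====

-- The canonical bigram list both programs compute, used only in the proofs.
def pvCan (ws : List String) : List String := (ws.zip ws.tail).map (fun p => p.1 ++ " " ++ p.2)

lemma can_cons_cons (x y : String) (t : List String) :
    pvCan (x :: y :: t) = (x ++ " " ++ y) :: pvCan (y :: t) := by simp [pvCan]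

lemma can_short (ws : List String) (h : ws.length < 2) : pvCan ws = [] := by
  match ws, h with
  | [], _ => rfl
  | [x], _ => rfl

lemma can_split (xs : List String) (a : String) (ys : List String) :
    pvCan (xs ++ a :: ys) = pvCan (xs ++ [a]) ++ pvCan (a :: ys) := by
  induction xs with
  | nil => simp [pvCan]
  | cons x xs ih =>
    cases xs with
    | nil => simp [pvCan]
    | cons x2 t =>
      simp only [List.cons_append, can_cons_cons] at *
      rw [ih]

-- B's divide-and-conquer computes exactly the canonical bigram list.
lemma bigrams_eq_can (ws : List String) : pvBigrams ws = pvCan ws := by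
  induction ws using pvBigrams.induct with
  | case1 ws h => rw [pvBigrams]; simp only [if_pos h]; exact (can_short ws h).symm
  | case2 ws h h2 =>
    match ws, h2 with
    | [a, b], _ =>
      rw [pvBigrams]; simp [pvCan, PySem.List.pyGetD, PySem.List.pyGet?, PySem.List.pyIdx?]
  | case3 ws h h2 ih1 ih2 =>
    rw [pvBigrams]
    rw [if_neg h, if_neg h2]
    rw [ih1, ih2, PySem.List.slice_to_natCast, PySem.List.slice_from_natCast]
    have hm : ws.length / 2 < ws.length := by omega
    have hdrop : ws.drop (ws.length / 2) = ws[ws.length / 2] :: ws.drop (ws.length / 2 + 1) :=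
      List.drop_eq_getElem_cons hm
    have htake : ws.take (ws.length / 2 + 1) = ws.take (ws.length / 2) ++ [ws[ws.length / 2]] := by
      rw [List.take_add_one, List.getElem?_eq_getElem hm]; rfl
    have hws : ws = ws.take (ws.length / 2) ++ ws[ws.length / 2] :: ws.drop (ws.length / 2 + 1) := by
      conv_lhs => rw [← List.take_append_drop (ws.length / 2) ws]
      rw [hdrop]
    rw [htake, hdrop]
    conv_rhs => rw [hws]
    exact (can_split _ _ _).symm

-- A's inner accumulator loop, rephrased as a structural fold, builds the canonical bigrams of s :: t.
lemma inner_fold_eq_can (t : List String) : ∀ (s : String) (acc : List String),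
    (t.foldl (fun (st : String × List String) x => (x, st.2 ++ [st.1 ++ " " ++ x])) (s, acc)).2
      = acc ++ pvCan (s :: t) := by
  induction t with
  | nil => intro s acc; simp [pvCan]
  | cons x t ih =>
    intro s acc
    simp only [List.foldl_cons, can_cons_cons]
    rw [ih]
    simp

-- One review processed by A's body equals the canonical bigram list of its words.
lemma body_eq (review : String) :
    (let words_review := PySem.Str.split₀ review
     if words_review.length = 0 then ([] : List String)
     else
       ((PySem.List.pyRange 1 words_review.length 1).foldl
         (fun (st : String × List String) i =>
           (PySem.List.pyGetD words_review i "",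
            st.2 ++ [st.1 ++ " " ++ PySem.List.pyGetD words_review i ""]))
         (PySem.List.pyGetD words_review 0 "", [])).2)
    = pvCan (PySem.Str.split₀ review) := by
  cases h : PySem.Str.split₀ review with
  | nil => simp [pvCan]
  | cons s t =>
    simp only [List.length_cons]
    rw [if_neg (by simp)]
    have hr := PySem.List.foldl_pyRange_pyGetD (xs := s :: t) (a := 1) (d := "")
      (f := fun (st : String × List String) x => (x, st.2 ++ [st.1 ++ " " ++ x]))
      (init := (PySem.List.pyGetD (s :: t) 0 "", [])) (by norm_num)
    simp only [PySem.List.len_eq, List.length_cons] at hr ⊢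
    rw [hr]
    simp [inner_fold_eq_can, PySem.List.pyGetD]

-- A's outer foldl-append accumulation is a map, for any body F.
lemma foldl_append_eq_map {α β : Type} (F : α → β) (l : List α) : ∀ (init : List β),
    l.foldl (fun ws r => ws ++ [F r]) init = init ++ l.map F := by
  induction l with
  | nil => intro init; simp
  | cons x l ih => intro init; simp [ih]

-- ===== VERDICT =====
theorem feature_words_spec : Claim_equal_feature_words := by
  intro review_text _
  show feature_words review_text = feature_words_alt review_text
  unfold feature_words feature_words_alt
  have h1 := foldl_append_eq_map
    (fun review =>
      let words_review := PySem.Str.split₀ review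
      if words_review.length = 0 then ([] : List String)
      else
        ((PySem.List.pyRange 1 words_review.length 1).foldl
          (fun (st : String × List String) i =>
            (PySem.List.pyGetD words_review i "",
             st.2 ++ [st.1 ++ " " ++ PySem.List.pyGetD words_review i ""]))
          (PySem.List.pyGetD words_review 0 "", [])).2)
    review_text []
  simp only [List.nil_append] at h1
  have h2 : ∀ review ws, (if (PySem.Str.split₀ review).length = 0 then ws ++ [[]]
      else ws ++ [((PySem.List.pyRange 1 (PySem.Str.split₀ review).length 1).foldl
          (fun (st : String × List String) i =>
            (PySem.List.pyGetD (PySem.Str.split₀ review) i "",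
             st.2 ++ [st.1 ++ " " ++ PySem.List.pyGetD (PySem.Str.split₀ review) i ""]))
          (PySem.List.pyGetD (PySem.Str.split₀ review) 0 "", [])).2])
      = ws ++ [if (PySem.Str.split₀ review).length = 0 then ([] : List String)
        else ((PySem.List.pyRange 1 (PySem.Str.split₀ review).length 1).foldl
          (fun (st : String × List String) i =>
            (PySem.List.pyGetD (PySem.Str.split₀ review) i "",
             st.2 ++ [st.1 ++ " " ++ PySem.List.pyGetD (PySem.Str.split₀ review) i ""]))
          (PySem.List.pyGetD (PySem.Str.split₀ review) 0 "", [])).2] := by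
    intro review ws; split <;> rfl
  simp only [h2] at *
  rw [h1]
  exact List.map_congr_left (fun review _ => (body_eq review).trans (bigrams_eq_can _).symm)
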